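-- pv_equiv track=rewrite | github.com/jmvgmr/challenges | codility/python/Fast & Curious/solution.py | solution
-- ===== SOURCE A (Python) =====
-- def solution(A):
--     # write your code in Python 3.6
--     mod = 10 ** 9 + 7
--     total = 0
--     distances = [0] * len(A)
--     for i, a in enumerate(A):
--         distances[i] = A[-1] - a
--         total += distances[i]
--
--     result = total - distances[0]
--     temp = result
--     for i, a in enumerate(A[:-1], 1):
--         temp = temp - distances[i] + i * (A[i] - A[i - 1])
--         if result > temp:
--             result = temp
--
--     return result % mod
-- ===== SOURCE B (Python) =====
-- def solution(A):
--     mod = 10 ** 9 + 7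
--     n = len(A)
--     last = A[-1]
--     P = [0]
--     for a in A:
--         P.append(P[-1] + a)
--     costs = [(n - 1 - i) * last - (P[n] - P[i + 1]) + i * A[i] - P[i] for i in range(n)]
--     return min(costs) % mod
-- ===== Notes on version B (the rewrite author's own statement) =====
-- stated objective: alternative
-- what changed: B computes each pivot's cost independently by a closed-form formula over one prefix-sum table and takes the minimum of that list, instead of A's two passes that fill a distances array and incrementally update a running temp/result pair.
import Mathlib
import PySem

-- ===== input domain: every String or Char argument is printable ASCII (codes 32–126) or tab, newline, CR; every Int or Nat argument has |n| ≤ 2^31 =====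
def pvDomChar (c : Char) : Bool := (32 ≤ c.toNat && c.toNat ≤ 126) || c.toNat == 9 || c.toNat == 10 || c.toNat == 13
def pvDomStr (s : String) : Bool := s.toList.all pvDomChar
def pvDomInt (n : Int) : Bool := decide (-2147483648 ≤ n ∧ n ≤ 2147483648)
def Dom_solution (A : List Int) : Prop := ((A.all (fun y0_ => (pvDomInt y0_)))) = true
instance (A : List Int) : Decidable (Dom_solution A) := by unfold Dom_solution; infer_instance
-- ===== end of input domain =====

-- B replaces A's incremental running-total update with a closed-form per-pivot cost computed from one prefix-sum table and minimised over all pivots (alternative decomposition, similar cost).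


-- ===== PORT A =====
def solution (A : List Int) : Int :=
  let m := 10 ^ 9 + 7
  match PySem.List.pyGet? A (-1) with
  | none => 0     -- indexing the last element raises IndexError on the empty list; excluded by Pre_solution
  | some lastv =>
    -- first loop: fills each distance with last-element minus a and accumulates total
    let st := (PySem.List.enumerate A 0).foldl
      (fun (s : List Int × Int) (p : Int × Int) =>
        (PySem.List.pySetD s.1 p.1 (lastv - p.2), s.2 + (lastv - p.2)))
      (List.replicate A.length 0, 0)
    let distances := st.1
    let total := st.2
    let result := total - PySem.List.pyGetD distances 0 0
    -- second loop enumerates all but the final element starting at index 1; the bound value a is unused, as in A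
    let fin := (PySem.List.enumerate (PySem.List.slice A none (some (-1))) 1).foldl
      (fun (s : Int × Int) (p : Int × Int) =>
        let temp := s.2 - PySem.List.pyGetD distances p.1 0
            + p.1 * (PySem.List.pyGetD A p.1 0 - PySem.List.pyGetD A (p.1 - 1) 0)
        (if s.1 > temp then temp else s.1, temp))
      (result, result)
    PySem.Int.mod fin.1 m

-- ===== PORT B =====
def solution_alt (A : List Int) : Int :=
  let m := 10 ^ 9 + 7
  let n : Int := A.length
  match PySem.List.pyGet? A (-1) with
  | none => 0     -- indexing the last element raises IndexError on the empty list; excluded by Pre_solution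
  | some lastv =>
    -- prefix-sum table P of the first k elements for every k
    let P := A.foldl (fun (P : List Int) a => P ++ [PySem.List.pyGetD P (-1) 0 + a]) [0]
    let costs := (PySem.List.pyRange 0 n).map (fun i =>
      (n - 1 - i) * lastv - (PySem.List.pyGetD P n 0 - PySem.List.pyGetD P (i + 1) 0)
        + i * PySem.List.pyGetD A i 0 - PySem.List.pyGetD P i 0)
    match PySem.List.min? costs (fun x => x) with
    | none => 0   -- unreachable: costs is nonempty whenever A is
    | some best => PySem.Int.mod best m

-- ===== PRECONDITION & SPEC =====
-- Both programs index the last element, which raises IndexError on the empty list; no other input is excluded.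
def Pre_solution (A : List Int) : Prop := A ≠ []
instance (A : List Int) : Decidable (Pre_solution A) := by unfold Pre_solution; infer_instance
def pvWitness_solution : List Int := [3, 1, 2]

def Spec_solution (A : List Int) (out : Int) : Prop := out = solution_alt A
instance (A : List Int) (out : Int) : Decidable (Spec_solution A out) := by unfold Spec_solution; infer_instance

-- ===== CLAIM (what is proved, stated in full; the proofs are below) =====
def Claim_equal_solution : Prop := ∀ (A : List Int), Dom_solution A → Pre_solution A → Spec_solution A (solution A)

-- ===== LEMMAS AND PROOFS =====

-- prefix sum of the first k elements of A
def pvPS (A : List Int) (k : Nat) : Int := (A.take k).sum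

-- the closed-form cost of pivot i that B evaluates
def pvCost (A : List Int) (lastv : Int) (i : Nat) : Int :=
  ((A.length : Int) - 1 - i) * lastv - (A.sum - pvPS A (i + 1)) + (i : Int) * A.getD i 0 - pvPS A i

-- running minimum of pvCost over pivots 0..k
def pvM (A : List Int) (lastv : Int) : Nat → Int
  | 0 => pvCost A lastv 0
  | k + 1 => min (pvM A lastv k) (pvCost A lastv (k + 1))

theorem pvPS_succ (A : List Int) (k : Nat) (h : k < A.length) :
    pvPS A (k + 1) = pvPS A k + A.getD k 0 := by
  have h2 := List.sum_take_succ A k h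
  simp [pvPS, h2, List.getD, List.getElem?_eq_getElem h]

theorem pvCost_succ (A : List Int) (lastv : Int) (k : Nat) (h : k + 1 < A.length) :
    pvCost A lastv (k + 1)
    = pvCost A lastv k - (lastv - A.getD (k + 1) 0)
      + ((k : Int) + 1) * (A.getD (k + 1) 0 - A.getD k 0) := by
  have h1 := pvPS_succ A (k + 1) h
  have h2 := pvPS_succ A k (by omega)
  simp [pvCost, h1, h2]; ring

theorem pvGetDMap (A : List Int) (lastv : Int) (j : Nat) (hj : j < A.length) :
    (A.map (fun a => lastv - a)).getD j 0 = lastv - A.getD j 0 := by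
  simp [List.getD_eq_getElem?_getD, List.getElem?_eq_getElem hj]

theorem pvSumMap (A : List Int) (lastv : Int) :
    (A.map (fun a => lastv - a)).sum = (A.length : Int) * lastv - A.sum := by
  induction A with
  | nil => simp
  | cons x xs ih => simp [ih]; ring

theorem pvTakeSetSucc (d : List Int) (s : Nat) (v : Int) (h : s < d.length) :
    (d.set s v).take (s + 1) = d.take s ++ [v] := by
  rw [List.set_eq_take_cons_drop v h]
  have hl : s + 1 = (d.take s).length + 1 := by simp [Nat.min_eq_left (Nat.le_of_lt h)]
  rw [hl, List.take_append]
  simp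

-- A's first loop: the distances array fills with (last element - a) and total accumulates their sum
theorem pvDistLoop (lastv : Int) : ∀ (xs d : List Int) (s : Nat) (t : Int),
    d.length = s + xs.length →
    (PySem.List.enumerate xs (s : Int)).foldl
      (fun (st : List Int × Int) (p : Int × Int) =>
        (PySem.List.pySetD st.1 p.1 (lastv - p.2), st.2 + (lastv - p.2))) (d, t)
    = (d.take s ++ xs.map (fun a => lastv - a), t + (xs.map (fun a => lastv - a)).sum) := by
  intro xs
  induction xs with
  | nil =>
    intro d s t h
    simp at h
    simp [PySem.List.enumerate, List.take_of_length_le (le_of_eq h)]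
  | cons x xs ih =>
    intro d s t h
    rw [PySem.List.enumerate_cons, List.foldl_cons]
    have hs : ((s : Int) + 1) = ((s + 1 : Nat) : Int) := by push_cast; ring
    simp only [PySem.List.pySetD_natCast]
    simp at h
    rw [hs, ih (d.set s (lastv - x)) (s + 1) (t + (lastv - x)) (by simp; omega)]
    rw [pvTakeSetSucc d s (lastv - x) (by omega)]
    simp
    ring

-- B's prefix loop, over an arbitrary nonempty accumulator
theorem pvPrefixAux : ∀ (xs P : List Int) (h : P ≠ []),
    xs.foldl (fun (P : List Int) a => P ++ [PySem.List.pyGetD P (-1) 0 + a]) P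
    = P ++ (List.range xs.length).map (fun k => P.getLast h + (xs.take (k + 1)).sum) := by
  intro xs
  induction xs with
  | nil => intro P h; simp
  | cons x xs ih =>
    intro P h
    rw [List.foldl_cons, PySem.List.pyGetD_neg_one P 0 h]
    rw [ih (P ++ [P.getLast h + x]) (by simp)]
    rw [List.getLast_append_singleton]
    rw [List.length_cons, List.range_succ_eq_map]
    simp only [List.map_cons, List.map_map]
    simp [List.append_assoc]
    intro a _
    ring

-- B's prefix loop builds exactly the table of prefix sums
theorem pvPrefixLoop (A : List Int) :
    A.foldl (fun (P : List Int) a => P ++ [PySem.List.pyGetD P (-1) 0 + a]) [0]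
    = (List.range (A.length + 1)).map (pvPS A) := by
  rw [pvPrefixAux A [0] (by simp)]
  rw [List.range_succ_eq_map]
  simp only [List.map_cons, List.map_map]
  simp [pvPS]

-- a fold over enumerate whose body ignores the element is a fold over the index range
theorem pvFoldlEnumFst {α β : Type} (xs : List α) (s : Int) (g : β → Int → β) (init : β) :
    (PySem.List.enumerate xs s).foldl (fun b p => g b p.1) init
    = (PySem.List.pyRange s (s + xs.length)).foldl g init := by
  rw [← PySem.List.map_fst_enumerate xs s, List.foldl_map]

-- A's second loop maintains (running minimum, current cost)
theorem pvMainLoop (A : List Int) (lastv : Int) :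
    ∀ (k : Nat), k < A.length →
    (PySem.List.pyRange 1 (1 + (k : Int))).foldl
      (fun (s : Int × Int) (i : Int) =>
        let temp := s.2 - PySem.List.pyGetD (A.map (fun a => lastv - a)) i 0
            + i * (PySem.List.pyGetD A i 0 - PySem.List.pyGetD A (i - 1) 0)
        (if s.1 > temp then temp else s.1, temp))
      (pvCost A lastv 0, pvCost A lastv 0)
    = (pvM A lastv k, pvCost A lastv k) := by
  intro k
  induction k with
  | zero => intro _; simp [PySem.List.pyRange_one_eq_nil (le_refl 1), pvM]
  | succ k ih =>
    intro hk
    have hb : (1 : Int) + ((k + 1 : Nat) : Int) = (1 + (k : Int)) + 1 := by push_cast; ring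
    rw [hb, PySem.List.pyRange_one_succ_right (by omega), List.foldl_append, ih (by omega)]
    simp only [List.foldl_cons, List.foldl_nil]
    have hi1 : ((1 : Int) + (k : Int)) = ((k + 1 : Nat) : Int) := by push_cast; ring
    rw [hi1]
    simp only [PySem.List.pyGetD_natCast]
    have hi2 : (((k + 1 : Nat) : Int)) - 1 = ((k : Nat) : Int) := by push_cast; ring
    rw [hi2]
    simp only [PySem.List.pyGetD_natCast]
    rw [pvGetDMap A lastv (k + 1) hk]
    have htemp : pvCost A lastv k - (lastv - A.getD (k + 1) 0)
        + ((k + 1 : Nat) : Int) * (A.getD (k + 1) 0 - A.getD k 0) = pvCost A lastv (k + 1) := by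
      rw [pvCost_succ A lastv k hk]; push_cast; ring
    rw [htemp]
    have hmin : (if pvM A lastv k > pvCost A lastv (k + 1) then pvCost A lastv (k + 1) else pvM A lastv k)
        = min (pvM A lastv k) (pvCost A lastv (k + 1)) := by omega
    rw [hmin]
    rfl

-- B's min over the cost list is the same running minimum
theorem pvMinFold (A : List Int) (lastv : Int) : ∀ (k : Nat),
    List.foldl min (pvCost A lastv 0) ((List.range k).map (fun j => pvCost A lastv (j + 1)))
    = pvM A lastv k := by
  intro k
  induction k with
  | zero => simp [pvM]
  | succ k ih => rw [List.range_succ, List.map_append, List.foldl_append, ih]; simp [pvM]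

-- A's second loop in the exact syntactic form it takes inside solution
theorem pvMainLoopEnum (A : List Int) (lastv : Int) (hA : A ≠ []) :
    (PySem.List.enumerate (PySem.List.slice A none (some (-1))) 1).foldl
      (fun (s : Int × Int) (p : Int × Int) =>
        (if s.1 > s.2 - PySem.List.pyGetD (List.map (fun a => lastv - a) A) p.1 0 +
              p.1 * (PySem.List.pyGetD A p.1 0 - PySem.List.pyGetD A (p.1 - 1) 0) then
            s.2 - PySem.List.pyGetD (List.map (fun a => lastv - a) A) p.1 0 +
              p.1 * (PySem.List.pyGetD A p.1 0 - PySem.List.pyGetD A (p.1 - 1) 0)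
          else s.1,
          s.2 - PySem.List.pyGetD (List.map (fun a => lastv - a) A) p.1 0 +
            p.1 * (PySem.List.pyGetD A p.1 0 - PySem.List.pyGetD A (p.1 - 1) 0)))
      (pvCost A lastv 0, pvCost A lastv 0)
    = (pvM A lastv (A.length - 1), pvCost A lastv (A.length - 1)) := by
  have hn : 1 ≤ A.length := List.length_pos_iff.mpr hA
  rw [PySem.List.slice_to_neg_one]
  refine (pvFoldlEnumFst A.dropLast 1
      (fun (s : Int × Int) (i : Int) =>
        (if s.1 > s.2 - PySem.List.pyGetD (List.map (fun a => lastv - a) A) i 0 +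
              i * (PySem.List.pyGetD A i 0 - PySem.List.pyGetD A (i - 1) 0) then
            s.2 - PySem.List.pyGetD (List.map (fun a => lastv - a) A) i 0 +
              i * (PySem.List.pyGetD A i 0 - PySem.List.pyGetD A (i - 1) 0)
          else s.1,
          s.2 - PySem.List.pyGetD (List.map (fun a => lastv - a) A) i 0 +
            i * (PySem.List.pyGetD A i 0 - PySem.List.pyGetD A (i - 1) 0)))
      (pvCost A lastv 0, pvCost A lastv 0)).trans ?_
  have hlen : ((1 : Int) + (A.dropLast.length : Int)) = 1 + ((A.length - 1 : Nat) : Int) := by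
    simp
  rw [hlen]
  exact pvMainLoop A lastv (A.length - 1) (by omega)

theorem solution_eq (A : List Int) (hA : A ≠ []) : solution A = solution_alt A := by
  have hn : 1 ≤ A.length := List.length_pos_iff.mpr hA
  set lastv := A.getLast hA with hlast
  have hd := pvDistLoop lastv A (List.replicate A.length 0) 0 0 (by simp)
  norm_num at hd
  simp only [solution, solution_alt, PySem.List.pyGet?_neg_one,
    List.getLast?_eq_some_getLast hA, ← hlast, hd, pvPrefixLoop A]
  -- the seed of A's second loop is the cost of pivot 0
  have hres : (List.map (fun a => lastv - a) A).sum
      - PySem.List.pyGetD (List.map (fun a => lastv - a) A) 0 0 = pvCost A lastv 0 := by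
    rw [PySem.List.pyGetD_zero, pvGetDMap A lastv 0 (by omega), pvSumMap]
    unfold pvCost
    rw [show (0 : Nat) + 1 = 1 from rfl, pvPS_succ A 0 (by omega)]
    simp [pvPS]
    ring
  rw [hres, pvMainLoopEnum A lastv hA]
  -- B's cost list is the list of pivot costs
  have hB : (PySem.List.pyRange 0 (A.length : Int)).map (fun i =>
        ((A.length : Int) - 1 - i) * lastv -
            (PySem.List.pyGetD (List.map (pvPS A) (List.range (A.length + 1))) (A.length : Int) 0 -
              PySem.List.pyGetD (List.map (pvPS A) (List.range (A.length + 1))) (i + 1) 0) +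
          i * PySem.List.pyGetD A i 0 -
          PySem.List.pyGetD (List.map (pvPS A) (List.range (A.length + 1))) i 0)
      = (List.range A.length).map (fun k => pvCost A lastv k) := by
    rw [PySem.List.pyRange_zero_nat A.length, List.map_map]
    apply List.map_congr_left
    intro k hk
    simp only [List.mem_range] at hk
    simp only [Function.comp]
    have hc1 : ((k : Int) + 1) = ((k + 1 : Nat) : Int) := by push_cast; ring
    rw [hc1]
    simp only [PySem.List.pyGetD_natCast]
    rw [PySem.List.getD_map_range (pvPS A) (A.length + 1) A.length 0 (by omega),
      PySem.List.getD_map_range (pvPS A) (A.length + 1) (k + 1) 0 (by omega),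
      PySem.List.getD_map_range (pvPS A) (A.length + 1) k 0 (by omega)]
    unfold pvCost
    rw [show pvPS A A.length = A.sum by simp [pvPS]]
  rw [hB]
  have hsplit : (List.range A.length).map (fun k => pvCost A lastv k)
      = pvCost A lastv 0 :: (List.range (A.length - 1)).map (fun j => pvCost A lastv (j + 1)) := by
    conv_lhs => rw [show A.length = (A.length - 1) + 1 by omega]
    rw [List.range_succ_eq_map, List.map_cons, List.map_map]
    simp [Function.comp, Nat.succ_eq_add_one]
  rw [hsplit, PySem.List.min?_id_cons, pvMinFold A lastv (A.length - 1)]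

-- ===== VERDICT (by name: the statement is the Claim_ definition above) =====
theorem solution_spec : Claim_equal_solution := by
  intro A _ hP
  unfold Spec_solution
  exact solution_eq A hP
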